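-- pv_equiv track=rewrite | github.com/shindesharad71/Data-Structures | 08.Hashing/15_maximum_number_of_elements.py | distinct_ids
-- ===== SOURCE A (Python) =====
-- def distinct_ids(arr: list, n: int, mi):
--     m = {}
--     v = []
--     count = 0
--
--     for i in range(n):
--         if arr[i] in m:
--             m[arr[i]] += 1
--         else:
--             m[arr[i]] = 1
--
--     # Store into the list value as key and vice-versa
--     for i in m:
--         v.append([m[i], i])
--
--     v.sort()
--     size = len(v)
--
--     for i in range(size):
--         if v[i][0] <= mi:
--             mi -= v[i][0]
--             count += 1
--
--         else:
--             return size - count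
--     return size - count
-- ===== SOURCE B (Python) =====
-- def distinct_ids(arr: list, n: int, mi):
--     # Counting sort over frequencies (each frequency is in 1..n), processed
--     # bucket-by-bucket in one arithmetic step instead of sorting + per-item greedy.
--     freq = {}
--     for i in range(n):
--         x = arr[i]
--         freq[x] = freq.get(x, 0) + 1
--     k = len(freq)
--     bucket = [0] * (max(n, 0) + 1)
--     for c in freq.values():
--         bucket[c] += 1
--     removed = 0
--     budget = mi
--     for f in range(1, len(bucket)):
--         cnt = bucket[f]
--         if cnt == 0:
--             continue
--         if f * cnt <= budget:
--             budget -= f * cnt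
--             removed += cnt
--         elif budget > 0:
--             removed += budget // f
--             break
--         else:
--             break
--     return k - removed
-- ===== Notes on version B (the rewrite author's own statement) =====
-- stated objective: alternative
-- what changed: Replaces the comparison sort of (count,id) pairs plus per-item greedy removal by a counting sort of the frequencies into buckets 1..n, with each bucket consumed in one arithmetic step (batch subtraction, one floor division at the break point).
import Mathlib
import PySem

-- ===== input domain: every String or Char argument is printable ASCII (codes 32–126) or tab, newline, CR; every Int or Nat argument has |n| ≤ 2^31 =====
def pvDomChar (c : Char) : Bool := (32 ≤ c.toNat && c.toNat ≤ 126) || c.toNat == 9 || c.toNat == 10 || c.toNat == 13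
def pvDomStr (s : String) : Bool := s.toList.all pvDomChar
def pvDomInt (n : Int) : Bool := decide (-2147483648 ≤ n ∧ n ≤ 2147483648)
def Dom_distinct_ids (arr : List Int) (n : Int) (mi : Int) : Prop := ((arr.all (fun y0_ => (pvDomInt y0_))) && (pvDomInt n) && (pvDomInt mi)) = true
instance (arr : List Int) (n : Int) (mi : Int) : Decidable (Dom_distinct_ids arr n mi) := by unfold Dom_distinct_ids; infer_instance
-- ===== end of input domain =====

-- B replaces A's comparison sort of (count, id) pairs + per-item greedy removal by a
-- counting sort of the frequencies into buckets 1..n consumed batch-wise (alternative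
-- algorithm, same result).


-- ===== PORT A =====
-- the final 'for i in range(size)' loop with its early 'return size - count'
def distinctIdsLoopA : List (Int × Int) → Int → Int → Int → Int
  | [], _, count, size => size - count
  | p :: rest, mi, count, size =>
      if p.1 ≤ mi then distinctIdsLoopA rest (mi - p.1) (count + 1) size
      else size - count

def distinct_ids (arr : List Int) (n : Int) (mi : Int) : Int :=
  let m := (PySem.List.pyRange 0 n 1).foldl
    (fun (m : PySem.Dict Int Int) i =>
      if m.contains ((PySem.List.pyGet? arr i).getD 0)
      then m.insert ((PySem.List.pyGet? arr i).getD 0) (m.getD ((PySem.List.pyGet? arr i).getD 0) 0 + 1)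
      else m.insert ((PySem.List.pyGet? arr i).getD 0) 1)
    PySem.Dict.empty
  let v := m.keys.foldl (fun (v : List (Int × Int)) i => v ++ [(m.getD i 0, i)]) []
  -- v.sort(): the entries are 2-element int lists, which Python compares
  -- lexicographically; the lexicographic key on the pair is exact here.
  let vs := PySem.List.sorted v (fun p => toLex (p.1, p.2)) false
  distinctIdsLoopA vs mi 0 (vs.length : Int)

-- ===== PORT B =====
-- bucket[c] += 1
def distinctIdsBump (b : List Int) (c : Int) : List Int :=
  PySem.List.pySetD b c (PySem.List.pyGetD b c 0 + 1)

-- the 'for f in range(1, len(bucket))' loop with its continue/break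
def distinctIdsLoopB (bucket : List Int) : List Int → Int → Int → Int
  | [], _, removed => removed
  | f :: fs, budget, removed =>
      if PySem.List.pyGetD bucket f 0 = 0 then distinctIdsLoopB bucket fs budget removed
      else if f * PySem.List.pyGetD bucket f 0 ≤ budget then
        distinctIdsLoopB bucket fs (budget - f * PySem.List.pyGetD bucket f 0)
          (removed + PySem.List.pyGetD bucket f 0)
      else if 0 < budget then removed + PySem.Int.floordiv budget f
      else removed

def distinct_ids_alt (arr : List Int) (n : Int) (mi : Int) : Int :=
  let freq := (PySem.List.pyRange 0 n 1).foldl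
    (fun (d : PySem.Dict Int Int) i =>
      d.insert ((PySem.List.pyGet? arr i).getD 0) (d.getD ((PySem.List.pyGet? arr i).getD 0) 0 + 1))
    PySem.Dict.empty
  let bucket := freq.values.foldl distinctIdsBump (List.replicate (max n 0 + 1).toNat (0 : Int))
  (freq.size : Int) - distinctIdsLoopB bucket (PySem.List.pyRange 1 (bucket.length : Int) 1) mi 0

-- ===== PRECONDITION & SPEC =====
-- Python A raises IndexError exactly when n > len(arr) (for negative n the loop is empty).
def Pre_distinct_ids (arr : List Int) (n : Int) (mi : Int) : Prop := n ≤ (arr.length : Int)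
instance (arr : List Int) (n : Int) (mi : Int) : Decidable (Pre_distinct_ids arr n mi) := by
  unfold Pre_distinct_ids; infer_instance

def pvWitness_distinct_ids : List Int × Int × Int := ([1, 1, 2, 3, 3, 3], 6, 3)

def Spec_distinct_ids (arr : List Int) (n : Int) (mi : Int) (out : Int) : Prop := out = distinct_ids_alt arr n mi
instance (arr : List Int) (n : Int) (mi : Int) (out : Int) : Decidable (Spec_distinct_ids arr n mi out) := by unfold Spec_distinct_ids; infer_instance

-- ===== CLAIM (what is proved, stated in full; the proofs are below) =====
def Claim_equal_distinct_ids : Prop := ∀ (arr : List Int) (n : Int) (mi : Int), Dom_distinct_ids arr n mi → Pre_distinct_ids arr n mi → Spec_distinct_ids arr n mi (distinct_ids arr n mi)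

-- ===== LEMMAS AND PROOFS =====

-- the common mathematical core: greedy removal over a list of frequencies, stopping
-- at the first frequency that exceeds the remaining budget
def pvGreedy : List Int → Int → Int
  | [], _ => 0
  | f :: r, mi => if f ≤ mi then 1 + pvGreedy r (mi - f) else 0

theorem pvLoopA_eq (l : List (Int × Int)) (mi count size : Int) :
    distinctIdsLoopA l mi count size = size - count - pvGreedy (l.map (·.1)) mi := by
  induction l generalizing mi count with
  | nil => simp [distinctIdsLoopA, pvGreedy]
  | cons p rest ih =>
    simp only [distinctIdsLoopA, List.map_cons, pvGreedy]
    split_ifs with h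
    · rw [ih]; ring
    · ring

theorem pvFdiv_pos (a b : Int) (hb : 0 < b) : PySem.Int.floordiv a b = a / b := by
  simp only [PySem.Int.floordiv]
  rw [Int.fdiv_eq_ediv]
  simp [le_of_lt hb]

theorem pvGreedy_replicate (f : Int) (hf : 1 ≤ f) (c : Nat) (hc : 0 < c)
    (rest : List Int) (budget : Int) :
    pvGreedy (List.replicate c f ++ rest) budget =
      if f * (c : Int) ≤ budget then (c : Int) + pvGreedy rest (budget - f * c)
      else if 0 < budget then PySem.Int.floordiv budget f else 0 := by
  induction c generalizing budget with
  | zero => omega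
  | succ c ih =>
    rw [List.replicate_succ, List.cons_append]
    simp only [pvGreedy]
    push_cast
    rcases Nat.eq_zero_or_pos c with hc0 | hc0
    · subst hc0
      simp only [List.replicate_zero, List.nil_append, Nat.cast_zero, zero_add, mul_one]
      by_cases h1 : f ≤ budget
      · rw [if_pos h1, if_pos h1]
      · rw [if_neg h1, if_neg h1]
        by_cases h4 : 0 < budget
        · rw [if_pos h4, pvFdiv_pos _ _ (by omega), Int.ediv_eq_zero_of_lt (by omega) (by omega)]
        · rw [if_neg h4]
    · have hexp : f * ((c : Int) + 1) = f * c + f := by ring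
      by_cases h1 : f ≤ budget
      · rw [if_pos h1, ih hc0 (budget - f)]
        by_cases h2 : f * (c : Int) ≤ budget - f
        · rw [if_pos h2, if_pos (show f * ((c : Int) + 1) ≤ budget by rw [hexp]; linarith)]
          have harg : budget - f - f * (c : Int) = budget - f * ((c : Int) + 1) := by ring
          rw [harg]
          ring
        · rw [if_neg h2, if_neg (show ¬ f * ((c : Int) + 1) ≤ budget by
            rw [hexp]; intro hcon; apply h2; linarith)]
          by_cases h3 : 0 < budget - f
          · rw [if_pos h3, if_pos (show (0 : Int) < budget by linarith)]
            rw [pvFdiv_pos _ _ (by omega), pvFdiv_pos _ _ (by omega)]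
            have hdiv : budget / f = (budget - f) / f + 1 := by
              conv_lhs => rw [show budget = (budget - f) + 1 * f by ring]
              rw [Int.add_mul_ediv_right _ _ (by omega : f ≠ 0)]
            rw [hdiv]
            ring
          · rw [if_neg h3, if_pos (show (0 : Int) < budget by omega)]
            have hbf : budget = f := by omega
            rw [pvFdiv_pos _ _ (by omega), hbf, Int.ediv_self (by omega)]
            omega
      · rw [if_neg h1]
        have hge : f ≤ f * ((c : Int) + 1) := by nlinarith
        rw [if_neg (show ¬ f * ((c : Int) + 1) ≤ budget by intro hcon; apply h1; linarith)]
        by_cases h4 : 0 < budget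
        · rw [if_pos h4, pvFdiv_pos _ _ (by omega), Int.ediv_eq_zero_of_lt (by omega) (by omega)]
        · rw [if_neg h4]

theorem pvLoopB_eq (bucket : List Int) (fl : List Int)
    (hf : ∀ f ∈ fl, 1 ≤ f ∧ 0 ≤ PySem.List.pyGetD bucket f 0)
    (budget removed : Int) :
    distinctIdsLoopB bucket fl budget removed =
      removed + pvGreedy (fl.flatMap (fun f => List.replicate (PySem.List.pyGetD bucket f 0).toNat f)) budget := by
  induction fl generalizing budget removed with
  | nil => simp [distinctIdsLoopB, pvGreedy]
  | cons f fs ih =>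
    have hff := hf f (by simp)
    have hfs : ∀ g ∈ fs, 1 ≤ g ∧ 0 ≤ PySem.List.pyGetD bucket g 0 := fun g hg => hf g (by simp [hg])
    simp only [distinctIdsLoopB, List.flatMap_cons]
    split_ifs with h0 h1 h2
    · rw [ih hfs]
      simp [h0]
    · rw [pvGreedy_replicate f hff.1 _ (by omega), ih hfs]
      rw [Int.toNat_of_nonneg hff.2]
      simp only [if_pos h1]
      ring
    · rw [pvGreedy_replicate f hff.1 _ (by omega)]
      rw [Int.toNat_of_nonneg hff.2]
      rw [if_neg h1, if_pos h2]
    · rw [pvGreedy_replicate f hff.1 _ (by omega)]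
      rw [Int.toNat_of_nonneg hff.2]
      rw [if_neg h1, if_neg h2]
      ring

theorem pvGetD_replicate (m : Nat) (x : Int) (hx : 0 ≤ x) :
    PySem.List.pyGetD (List.replicate m (0 : Int)) x 0 = 0 := by
  simp only [PySem.List.pyGetD, PySem.List.pyGet?_of_nonneg _ hx, List.getElem?_replicate]
  split <;> rfl

-- the bucket-filling fold counts occurrences
theorem pvBump_fold (l : List Int) (b : List Int)
    (h : ∀ c ∈ l, 0 ≤ c ∧ c < (b.length : Int)) (x : Int) (hx : 0 ≤ x) :
    PySem.List.pyGetD (l.foldl distinctIdsBump b) x 0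
      = PySem.List.pyGetD b x 0 + (l.count x : Int) := by
  induction l generalizing b with
  | nil => simp
  | cons c l' ih =>
    obtain ⟨hc0, hclt⟩ := h c List.mem_cons_self
    obtain ⟨cn, rfl⟩ : ∃ cn : Nat, c = (cn : Int) := ⟨c.toNat, (Int.toNat_of_nonneg hc0).symm⟩
    obtain ⟨xn, rfl⟩ : ∃ xn : Nat, x = (xn : Int) := ⟨x.toNat, (Int.toNat_of_nonneg hx).symm⟩
    have hcn : cn < b.length := by exact_mod_cast hclt
    have hlen : (distinctIdsBump b (cn : Int)).length = b.length := by
      simp [distinctIdsBump]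
    rw [List.foldl_cons, ih _ (by
      intro d hd
      rw [hlen]
      exact h d (List.mem_cons_of_mem _ hd))]
    simp only [distinctIdsBump]
    rw [PySem.List.pyGetD_pySetD_natCast _ _ _ _ _ hcn]
    by_cases hxc : xn = cn
    · subst hxc
      rw [if_pos rfl, List.count_cons_self]
      push_cast
      ring
    · rw [if_neg hxc, List.count_cons_of_ne (by exact_mod_cast Ne.symm hxc)]

theorem pvBump_fold_length (l : List Int) (b : List Int) :
    (l.foldl distinctIdsBump b).length = b.length := by
  induction l generalizing b with
  | nil => rfl
  | cons c l' ih =>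
    rw [List.foldl_cons, ih]
    exact PySem.List.length_pySetD _ _ _

-- counting occurrences in the bucket flattening
theorem pvCount_flat (fl : List Int) (hnd : fl.Nodup) (g : Int → Nat) (x : Int) :
    (fl.flatMap (fun f => List.replicate (g f) f)).count x = if x ∈ fl then g x else 0 := by
  induction fl with
  | nil => simp
  | cons f fs ih =>
    rcases List.nodup_cons.mp hnd with ⟨hnf, hnd'⟩
    rw [List.flatMap_cons, List.count_append, List.count_replicate, ih hnd']
    by_cases hxf : x = f
    · subst hxf
      simp [if_neg hnf]
    · simp only [List.mem_cons]
      by_cases hm : x ∈ fs <;> simp [hm, hxf, Ne.symm hxf]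

-- the flattening is weakly increasing
theorem pvFlat_pairwise (fl : List Int) (hp : fl.Pairwise (· < ·)) (g : Int → Nat) :
    (fl.flatMap (fun f => List.replicate (g f) f)).Pairwise (· ≤ ·) := by
  induction fl with
  | nil => simp
  | cons f fs ih =>
    rcases List.pairwise_cons.mp hp with ⟨hlt, hp'⟩
    rw [List.flatMap_cons, List.pairwise_append]
    refine ⟨List.pairwise_replicate.mpr (Or.inr le_rfl), ih hp', ?_⟩
    intro a ha b hb
    have ha' := List.eq_of_mem_replicate ha
    rcases List.mem_flatMap.mp hb with ⟨f', hf', hb'⟩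
    have hb'' := List.eq_of_mem_replicate hb'
    subst ha'; subst hb''
    exact le_of_lt (hlt _ hf')

-- main equivalence: both programs are k − pvGreedy(sorted counts, mi)
theorem pvMain (arr : List Int) (n : Int) (mi : Int) :
    distinct_ids arr n mi = distinct_ids_alt arr n mi := by
  simp only [distinct_ids, distinct_ids_alt]
  set xs := (PySem.List.pyRange 0 n 1).map (fun i => (PySem.List.pyGet? arr i).getD 0) with hxs
  -- both dict-building folds produce the counter of xs
  have hfoldeq :
      (PySem.List.pyRange 0 n 1).foldl
        (fun (m : PySem.Dict Int Int) i =>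
          if m.contains ((PySem.List.pyGet? arr i).getD 0)
          then m.insert ((PySem.List.pyGet? arr i).getD 0) (m.getD ((PySem.List.pyGet? arr i).getD 0) 0 + 1)
          else m.insert ((PySem.List.pyGet? arr i).getD 0) 1) PySem.Dict.empty
      = (PySem.List.pyRange 0 n 1).foldl
        (fun (d : PySem.Dict Int Int) i =>
          d.insert ((PySem.List.pyGet? arr i).getD 0) (d.getD ((PySem.List.pyGet? arr i).getD 0) 0 + 1))
        PySem.Dict.empty := by
    apply PySem.List.foldl_congr_mem
    intro d i _
    by_cases hc : d.contains ((PySem.List.pyGet? arr i).getD 0)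
    · rw [if_pos hc]
    · rw [if_neg hc, PySem.Dict.getD_of_not_contains _ _ (by simpa using hc), zero_add]
  have hcounter :
      (PySem.List.pyRange 0 n 1).foldl
        (fun (d : PySem.Dict Int Int) i =>
          d.insert ((PySem.List.pyGet? arr i).getD 0) (d.getD ((PySem.List.pyGet? arr i).getD 0) 0 + 1))
        PySem.Dict.empty
      = PySem.Dict.counter xs := by
    rw [hxs]
    have h0 := PySem.Dict.foldl_insert_getD_add_one_eq_counter
      ((PySem.List.pyRange 0 n 1).map (fun i => (PySem.List.pyGet? arr i).getD 0))
    simp only [List.foldl_map] at h0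
    exact h0
  rw [hfoldeq, hcounter]
  set counts := (PySem.Set.ofList xs).map (fun kk => ((xs.count kk : Nat) : Int)) with hcounts
  -- shape of v
  have hv : (PySem.Dict.counter xs).keys.foldl
        (fun (v : List (Int × Int)) i => v ++ [((PySem.Dict.counter xs).getD i 0, i)]) []
      = (PySem.Set.ofList xs).map (fun kk => (((xs.count kk : Nat) : Int), kk)) := by
    rw [PySem.List.foldl_append_singleton_eq_map, PySem.Dict.keys_counter, List.nil_append]
    apply List.map_congr_left
    intro kk _
    rw [PySem.Dict.getD_counter]
  rw [hv]
  -- values of the counter are the counts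
  have hvalues : (PySem.Dict.counter xs).values = counts := by
    show ((PySem.Dict.counter xs).items.map (·.2)) = counts
    rw [PySem.Dict.items_counter, List.map_map, hcounts]
    rfl
  -- size of the counter is the number of distinct ids
  have hsize : ((PySem.Dict.counter xs).size : Int) = (counts.length : Int) := by
    show (((PySem.Dict.counter xs).items.length : Nat) : Int) = _
    rw [PySem.Dict.items_counter, hcounts]
    simp
  -- bounds on counts
  have hxslen : xs.length = n.toNat := by
    rw [hxs, List.length_map, PySem.List.length_pyRange_one]
    simp
  have hcbound : ∀ c ∈ counts, 1 ≤ c ∧ c ≤ (max n 0 : Int) := by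
    intro c hc
    rw [hcounts] at hc
    rcases List.mem_map.mp hc with ⟨kk, hkk, rfl⟩
    have hmem : kk ∈ xs := (PySem.Set.mem_ofList xs kk).mp hkk
    have h1 : 0 < xs.count kk := List.count_pos_iff.mpr hmem
    have h2 : xs.count kk ≤ xs.length := List.count_le_length
    constructor
    · exact_mod_cast h1
    · have : (xs.length : Int) ≤ max n 0 := by rw [hxslen]; omega
      omega
  rw [hvalues, hsize]
  set M := (max n 0 + 1).toNat with hM
  set bucket := counts.foldl distinctIdsBump (List.replicate M (0 : Int)) with hbucket
  have hblen : bucket.length = M := by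
    rw [hbucket, pvBump_fold_length, List.length_replicate]
  have hMint : (M : Int) = max n 0 + 1 := by rw [hM]; omega
  have hbget : ∀ x : Int, 0 ≤ x → PySem.List.pyGetD bucket x 0 = (counts.count x : Int) := by
    intro x hx
    rw [hbucket, pvBump_fold _ _ (by
      intro c hc
      have := hcbound c hc
      rw [List.length_replicate]
      omega) _ hx]
    rw [pvGetD_replicate _ _ hx, zero_add]
  set fl := PySem.List.pyRange 1 (bucket.length : Int) 1 with hfl
  have hflmem : ∀ f : Int, f ∈ fl ↔ 1 ≤ f ∧ f < (M : Int) := by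
    intro f
    rw [hfl, PySem.List.mem_pyRange_one, hblen]
  -- rewrite B's loop into pvGreedy over the bucket flattening
  rw [pvLoopB_eq bucket fl (by
    intro f hfm
    have h1f := ((hflmem f).mp hfm).1
    refine ⟨h1f, ?_⟩
    rw [hbget f (by omega)]
    positivity)]
  have hflat : fl.flatMap (fun f => List.replicate (PySem.List.pyGetD bucket f 0).toNat f)
      = fl.flatMap (fun f => List.replicate (counts.count f) f) := by
    rw [List.flatMap_def, List.flatMap_def]
    congr 1
    apply List.map_congr_left
    intro f hfm
    have h1f := ((hflmem f).mp hfm).1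
    rw [hbget f (by omega)]
    simp
  rw [hflat]
  -- rewrite A's loop into pvGreedy over the sorted counts
  rw [pvLoopA_eq]
  set v := (PySem.Set.ofList xs).map (fun kk => (((xs.count kk : Nat) : Int), kk)) with hvdef
  set sA := (PySem.List.sorted v (fun p => toLex (p.1, p.2)) false).map (·.1) with hsA
  set sB := fl.flatMap (fun f => List.replicate (counts.count f) f) with hsB
  -- the two frequency lists agree
  have hpermA : sA.Perm counts := by
    have h1 : (PySem.List.sorted v (fun p => toLex (p.1, p.2)) false).Perm v :=
      PySem.List.sorted_perm _ _ _
    have h2 : v.map (·.1) = counts := by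
      rw [hvdef, hcounts, List.map_map]
      rfl
    rw [hsA, ← h2]
    exact h1.map _
  have hpermB : sB.Perm counts := by
    rw [List.perm_iff_count]
    intro x
    rw [hsB, pvCount_flat fl (by rw [hfl]; exact PySem.List.nodup_pyRange_one _ _) _ x]
    by_cases hm : x ∈ fl
    · rw [if_pos hm]
    · rw [if_neg hm]
      by_cases hmc : x ∈ counts
      · exfalso
        apply hm
        rw [hflmem]
        have := hcbound x hmc
        omega
      · rw [List.count_eq_zero.mpr hmc]
  have hpwA : sA.Pairwise (· ≤ ·) := by
    rw [hsA, List.pairwise_map]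
    have := PySem.List.sorted_pairwise v (fun p => toLex (p.1, p.2))
    apply this.imp
    intro a b hab
    rcases Prod.Lex.toLex_le_toLex.mp hab with h | h
    · exact le_of_lt h
    · exact le_of_eq h.1
  have hpwB : sB.Pairwise (· ≤ ·) := by
    rw [hsB]
    exact pvFlat_pairwise fl (by rw [hfl]; exact PySem.List.pairwise_lt_pyRange_one _ _) _
  have hAB : sA = sB :=
    List.eq_of_perm_of_sorted (fun a b _ _ h1 h2 => le_antisymm h1 h2) hpwA hpwB
      (hpermA.trans hpermB.symm)
  have hlenA : ((PySem.List.sorted v (fun p => toLex (p.1, p.2)) false).length : Int)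
      = (counts.length : Int) := by
    rw [PySem.List.length_sorted, hvdef, hcounts]
    simp
  rw [hAB, hlenA]
  ring

-- ===== VERDICT (by name: the statement is the Claim_ definition above) =====
theorem distinct_ids_spec : Claim_equal_distinct_ids := by
  intro arr n mi _ _
  unfold Spec_distinct_ids
  exact pvMain arr n mi
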